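-- pv_equiv track=rewrite | github.com/SalahBelila/lfi_1 | checker.py | analyze_clausal_set
-- ===== SOURCE A (Python) =====
-- def analyze_clause(clause):
--     clause = clause.replace(' ', '').replace(')', '').replace('(', '').split('+')
--     for c in clause:
--         c = list(c)
--         if len(c) == 2:
--             if c[0] == '-' and ((64 < ord(c[1]) < 91) or (96 < ord(c[1]) < 123)):
--                 continue
--             else:
--                 return False
--         elif len(c) == 1:
--             if (64 < ord(c[0]) < 91) or (96 < ord(c[0]) < 123):
--                 continue
--             else:
--                 return False
--         else:
--             return False
--     return True
--
-- def analyze_clausal_set(c_set):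
--     c_set = c_set.replace(' ', '').replace(')', '').replace('(', '').split(',')
--     for c in c_set:
--         if analyze_clause(c):
--             continue
--         else:
--             return False
--     return True
-- ===== SOURCE B (Python) =====
-- def analyze_clausal_set(c_set):
--     # Single left-to-right scan of the cleaned string (grammar: lit (sep lit)*,
--     # lit = '-'? letter, sep in {',', '+'}) instead of nested split loops.
--     s = c_set.replace(' ', '').replace(')', '').replace('(', '')
--     i, n = 0, len(s)
--     while True:
--         if i >= n:
--             return False
--         if s[i] == '-' and i + 1 < n:
--             head_i = i + 1
--         else:
--             head_i = i
--         if not ('A' <= s[head_i] <= 'Z' or 'a' <= s[head_i] <= 'z'):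
--             return False
--         i = head_i + 1
--         if i == n:
--             return True
--         if s[i] != ',' and s[i] != '+':
--             return False
--         i += 1
-- ===== Notes on version B (the rewrite author's own statement) =====
-- stated objective: alternative
-- what changed: Replaces A's clean-then-split-on-','-then-split-on-'+' nested loops with one left-to-right scan of the cleaned string that checks the grammar literal (sep literal)* directly, with literal = optional '-' followed by an ASCII letter.
import Mathlib
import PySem

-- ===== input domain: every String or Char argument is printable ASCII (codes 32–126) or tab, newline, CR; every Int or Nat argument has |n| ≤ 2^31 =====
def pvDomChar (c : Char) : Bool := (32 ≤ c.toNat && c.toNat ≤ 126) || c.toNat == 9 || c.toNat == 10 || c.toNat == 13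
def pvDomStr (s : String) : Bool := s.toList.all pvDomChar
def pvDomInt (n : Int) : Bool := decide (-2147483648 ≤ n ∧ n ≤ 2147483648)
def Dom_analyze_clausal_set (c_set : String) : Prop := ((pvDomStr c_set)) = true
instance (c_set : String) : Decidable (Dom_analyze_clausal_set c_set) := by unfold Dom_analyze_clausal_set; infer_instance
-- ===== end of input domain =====

-- B replaces A's clean/split-on-','/split-on-'+' nested loops by one left-to-right scan of
-- the cleaned string (grammar: literal (sep literal)*, literal = '-'? letter); objective: alternative.

-- ===== PORT A =====
-- A's character test: 64 < ord(c) < 91 or 96 < ord(c) < 123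
def pvOrdOk (c : Char) : Bool := (64 < c.toNat && c.toNat < 91) || (96 < c.toNat && c.toNat < 123)

-- the body of A's per-literal check (c[0]/c[1] read with getD after the length test, exact)
def pvLitOk (c : List Char) : Bool :=
  if c.length = 2 then (c.getD 0 ' ' == '-') && pvOrdOk (c.getD 1 ' ')
  else if c.length = 1 then pvOrdOk (c.getD 0 ' ')
  else false

-- analyze_clause: replace ' ', ')', '(' by '', split on '+', then the for-loop with
-- continue / return False / final return True, i.e. List.all of the per-literal check
def analyze_clause (clause : List Char) : Bool :=
  (PySem.Chars.splitOn (PySem.Chars.replace (PySem.Chars.replace (PySem.Chars.replace clause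
      [' '] []) [')'] []) ['('] []) ['+']).all pvLitOk

def analyze_clausal_set (c_set : String) : Bool :=
  (PySem.Chars.splitOn (PySem.Chars.replace (PySem.Chars.replace (PySem.Chars.replace c_set.toList
      [' '] []) [')'] []) ['('] []) [',']).all analyze_clause

-- ===== PORT B =====
-- B's letter test: 'A' <= c <= 'Z' or 'a' <= c <= 'z'
def pvIsLetter (c : Char) : Bool :=
  (decide ('A' ≤ c) && decide (c ≤ 'Z')) || (decide ('a' ≤ c) && decide (c ≤ 'z'))

-- Source B's while loop over the character positions, as the obvious tail recursion over the
-- remaining characters: optional '-', a required letter, then end of input or a separator.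
def pvScan : List Char → Bool
  | [] => false
  | '-' :: c :: [] => pvIsLetter c
  | '-' :: c :: s :: rest => pvIsLetter c && (s == ',' || s == '+') && pvScan rest
  | c :: [] => pvIsLetter c
  | c :: s :: rest => pvIsLetter c && (s == ',' || s == '+') && pvScan rest

def analyze_clausal_set_alt (c_set : String) : Bool :=
  pvScan (PySem.Chars.replace (PySem.Chars.replace (PySem.Chars.replace c_set.toList
      [' '] []) [')'] []) ['('] [])

-- ===== PRECONDITION & SPEC =====
def Spec_analyze_clausal_set (c_set : String) (out : Bool) : Prop := out = analyze_clausal_set_alt c_set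
instance (c_set : String) (out : Bool) : Decidable (Spec_analyze_clausal_set c_set out) := by unfold Spec_analyze_clausal_set; infer_instance

-- ===== CLAIM (what is proved, stated in full; the proofs are below) =====
def Claim_equal_analyze_clausal_set : Prop := ∀ (c_set : String), Dom_analyze_clausal_set c_set → Spec_analyze_clausal_set c_set (analyze_clausal_set c_set)

-- ===== LEMMAS AND PROOFS =====

-- s.replace(ch, '') for a single character ch is a filter
theorem pv_replace_go_single (ch : Char) :
    ∀ (fuel : Nat) (l acc : List Char), l.length ≤ fuel →
      PySem.Chars.replace.go [ch] [] fuel l acc = acc.reverse ++ l.filter (· != ch) := by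
  intro fuel
  induction fuel with
  | zero =>
    intro l acc h
    have : l = [] := List.eq_nil_of_length_eq_zero (Nat.le_zero.mp h)
    subst this
    simp [PySem.Chars.replace.go]
  | succ n ih =>
    intro l acc h
    cases l with
    | nil => simp [PySem.Chars.replace.go]
    | cons c t =>
      rw [PySem.Chars.replace.go]
      by_cases hc : c = ch
      · subst hc
        have hp : List.isPrefixOf [c] (c :: t) = true := by simp [List.isPrefixOf]
        simp only [hp, if_true, List.length_cons, List.length_nil, List.drop_succ_cons,
          List.drop_zero, List.reverse_nil, List.nil_append]
        rw [ih t acc (by simpa using h)]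
        simp
      · have hp : List.isPrefixOf [ch] (c :: t) = false := by
          simp [List.isPrefixOf]; exact fun hh => absurd hh.symm hc
        simp only [hp, Bool.false_eq_true, if_false]
        rw [ih t (c :: acc) (by simpa using h)]
        simp [hc]

theorem pv_replace_single (ch : Char) (l : List Char) :
    PySem.Chars.replace l [ch] [] = l.filter (· != ch) := by
  rw [PySem.Chars.replace]
  simp only [List.isEmpty_cons, Bool.false_eq_true, if_false]
  simpa using pv_replace_go_single ch l.length l [] le_rfl

-- split on one character, structurally
def pvSplitC (sep : Char) : List Char → List (List Char)
  | [] => [[]]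
  | c :: t => if c = sep then [] :: pvSplitC sep t else (pvSplitC sep t).modifyHead (c :: ·)

theorem pvSplitC_ne_nil (sep : Char) (l : List Char) : pvSplitC sep l ≠ [] := by
  cases l with
  | nil => simp [pvSplitC]
  | cons c t =>
    simp only [pvSplitC]
    split
    · simp
    · intro hh
      have := congrArg List.length hh
      simp at this
      exact pvSplitC_ne_nil sep t this

theorem pv_splitOn_go_single (ch : Char) :
    ∀ (fuel : Nat) (l cur : List Char) (acc : List (List Char)), l.length ≤ fuel →
      PySem.Chars.splitOn.go [ch] fuel l cur acc
        = acc.reverse ++ (pvSplitC ch l).modifyHead (cur.reverse ++ ·) := by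
  intro fuel
  induction fuel with
  | zero =>
    intro l cur acc h
    have : l = [] := List.eq_nil_of_length_eq_zero (Nat.le_zero.mp h)
    subst this
    simp [PySem.Chars.splitOn.go, pvSplitC]
  | succ n ih =>
    intro l cur acc h
    cases l with
    | nil => simp [PySem.Chars.splitOn.go, pvSplitC]
    | cons c t =>
      rw [PySem.Chars.splitOn.go]
      by_cases hc : c = ch
      · subst hc
        have hp : List.isPrefixOf [c] (c :: t) = true := by simp [List.isPrefixOf]
        simp only [hp, if_true, List.length_cons, List.length_nil, List.drop_succ_cons, List.drop_zero]
        rw [ih t [] (cur.reverse :: acc) (by simpa using h)]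
        obtain ⟨h0, hs, hh⟩ := List.exists_cons_of_ne_nil (pvSplitC_ne_nil c t)
        simp [pvSplitC, hh]
      · have hp : List.isPrefixOf [ch] (c :: t) = false := by
          simp [List.isPrefixOf]; exact fun hh => absurd hh.symm hc
        simp only [hp, Bool.false_eq_true, if_false]
        rw [ih t (c :: cur) acc (by simpa using h)]
        obtain ⟨h0, hs, hh⟩ := List.exists_cons_of_ne_nil (pvSplitC_ne_nil ch t)
        simp [pvSplitC, hc, hh]

theorem pv_splitOn_single (ch : Char) (l : List Char) :
    PySem.Chars.splitOn l [ch] = pvSplitC ch l := by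
  rw [PySem.Chars.splitOn]
  rw [pv_splitOn_go_single ch (l.length + 1) l [] [] (Nat.le_succ _)]
  obtain ⟨h0, hs, hh⟩ := List.exists_cons_of_ne_nil (pvSplitC_ne_nil ch l)
  simp [hh]

theorem pv_mem_of_mem_splitC {sep c : Char} {x l : List Char}
    (hx : x ∈ pvSplitC sep l) (hc : c ∈ x) : c ∈ l := by
  induction l generalizing x with
  | nil => simp [pvSplitC] at hx; subst hx; simp at hc
  | cons a t ih =>
    simp only [pvSplitC] at hx
    split at hx
    · rcases List.mem_cons.mp hx with h | h
      · subst h; simp at hc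
      · exact List.mem_cons_of_mem a (ih h hc)
    · obtain ⟨h0, hs, hh⟩ := List.exists_cons_of_ne_nil (pvSplitC_ne_nil sep t)
      rw [hh] at hx
      simp only [List.modifyHead_cons] at hx
      rcases List.mem_cons.mp hx with h | h
      · subst h
        rcases List.mem_cons.mp hc with h | h
        · subst h; exact List.mem_cons_self
        · exact List.mem_cons_of_mem a (ih (hh ▸ List.mem_cons_self) h)
      · exact List.mem_cons_of_mem a (ih (hh ▸ List.mem_cons_of_mem h0 h) hc)

-- split on both separators at once
def pvSplitB : List Char → List (List Char)
  | [] => [[]]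
  | c :: t => if c = ',' ∨ c = '+' then [] :: pvSplitB t else (pvSplitB t).modifyHead (c :: ·)

theorem pvSplitB_ne_nil (l : List Char) : pvSplitB l ≠ [] := by
  cases l with
  | nil => simp [pvSplitB]
  | cons c t =>
    simp only [pvSplitB]
    split
    · simp
    · intro hh
      have := congrArg List.length hh
      simp at this
      exact pvSplitB_ne_nil t this

-- splitting on ',' and then each piece on '+' flattens to the two-separator split
theorem pvSplitB_eq_flatten (l : List Char) :
    pvSplitB l = ((pvSplitC ',' l).map (pvSplitC '+')).flatten := by
  induction l with
  | nil => simp [pvSplitB, pvSplitC]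
  | cons c t ih =>
    by_cases hc : c = ','
    · subst hc; simp [pvSplitB, pvSplitC, ih]
    · obtain ⟨h0, hs, hh⟩ := List.exists_cons_of_ne_nil (pvSplitC_ne_nil ',' t)
      rw [hh] at ih
      simp only [List.map_cons, List.flatten_cons] at ih
      by_cases hp : c = '+'
      · subst hp
        simp [pvSplitB, pvSplitC, hc, hh, ih]
      · obtain ⟨g0, gs, gg⟩ := List.exists_cons_of_ne_nil (pvSplitC_ne_nil '+' h0)
        rw [gg] at ih
        simp only [pvSplitB, pvSplitC, hc, hp, or_self, if_false, hh, gg,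
          List.modifyHead_cons, List.map_cons, List.flatten_cons, ih]
        simp

-- A's ord-interval test and B's letter-range test agree
theorem pvOrdOk_eq_isLetter (c : Char) : pvOrdOk c = pvIsLetter c := by
  have key : ∀ (a b : Char), decide (a ≤ b) = decide (a.toNat ≤ b.toNat) := by
    intro a b
    simp only [Char.le_def, UInt32.le_iff_toNat_le, Char.toNat]
    rfl
  simp only [pvOrdOk, pvIsLetter, key]
  have hA : ('A' : Char).toNat = 65 := by decide
  have hZ : ('Z' : Char).toNat = 90 := by decide
  have ha : ('a' : Char).toNat = 97 := by decide
  have hz : ('z' : Char).toNat = 122 := by decide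
  rw [hA, hZ, ha, hz]
  refine Bool.eq_iff_iff.mpr ?_
  simp only [Bool.or_eq_true, Bool.and_eq_true, decide_eq_true_eq]
  omega

-- all literal pieces of the two-separator split valid = the single scan succeeds
theorem pv_main (l : List Char) : (pvSplitB l).all pvLitOk = pvScan l := by
  induction l using pvScan.induct with
  | case1 => simp [pvSplitB, pvLitOk, pvScan]
  | case2 c =>
    by_cases hc : c = ',' ∨ c = '+'
    · rcases hc with hc | hc <;> subst hc <;> decide
    · push_neg at hc
      simp [pvSplitB, hc.1, hc.2, pvLitOk, pvScan, pvOrdOk_eq_isLetter]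
  | case3 c s rest ih =>
    by_cases hc : c = ',' ∨ c = '+'
    · have h1 : pvSplitB ('-' :: c :: s :: rest) = ['-'] :: pvSplitB (s :: rest) := by
        simp [pvSplitB, hc]
      have h2 : pvIsLetter c = false := by
        rcases hc with hc | hc <;> subst hc <;> decide
      simp [h1, h2, pvLitOk, pvScan, pvOrdOk]
    · push_neg at hc
      by_cases hs : s = ',' ∨ s = '+'
      · have h1 : pvSplitB ('-' :: c :: s :: rest) = ['-', c] :: pvSplitB rest := by
          simp [pvSplitB, hc.1, hc.2, hs]
        have h2 : (s == ',' || s == '+') = true := by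
          rcases hs with hs | hs <;> subst hs <;> decide
        simp [h1, h2, pvLitOk, pvScan, pvOrdOk_eq_isLetter, ih]
      · push_neg at hs
        obtain ⟨h0, hs0, hh⟩ := List.exists_cons_of_ne_nil (pvSplitB_ne_nil rest)
        have h1 : pvSplitB ('-' :: c :: s :: rest) = ('-' :: c :: s :: h0) :: hs0 := by
          simp [pvSplitB, hc.1, hc.2, hs.1, hs.2, hh]
        have h2 : (s == ',' || s == '+') = false := by
          simp [hs.1, hs.2]
        simp [h1, h2, pvLitOk, pvScan]
  | case4 c =>
    by_cases hc : c = ',' ∨ c = '+'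
    · rcases hc with hc | hc <;> subst hc <;> decide
    · push_neg at hc
      simp [pvSplitB, hc.1, hc.2, pvLitOk, pvScan, pvOrdOk_eq_isLetter]
  | case5 c s rest hne1 hne2 ih =>
    have hne : c ≠ '-' := by
      intro h
      cases rest with
      | nil => exact hne1 h rfl
      | cons a t => exact hne2 a t h rfl
    by_cases hc : c = ',' ∨ c = '+'
    · have h1 : pvSplitB (c :: s :: rest) = [] :: pvSplitB (s :: rest) := by
        simp [pvSplitB, hc]
      have h2 : pvIsLetter c = false := by
        rcases hc with hc | hc <;> subst hc <;> decide
      rw [pvScan]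
      · simp [h1, h2, pvLitOk]
      · exact hne1
      · exact hne2
    · push_neg at hc
      by_cases hs : s = ',' ∨ s = '+'
      · have h1 : pvSplitB (c :: s :: rest) = [c] :: pvSplitB rest := by
          simp [pvSplitB, hc.1, hc.2, hs]
        have h2 : (s == ',' || s == '+') = true := by
          rcases hs with hs | hs <;> subst hs <;> decide
        rw [pvScan]
        · simp [h1, h2, pvLitOk, pvOrdOk_eq_isLetter, ih]
        · exact hne1
        · exact hne2
      · push_neg at hs
        obtain ⟨h0, hs0, hh⟩ := List.exists_cons_of_ne_nil (pvSplitB_ne_nil rest)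
        have h1 : pvSplitB (c :: s :: rest) = (c :: s :: h0) :: hs0 := by
          simp [pvSplitB, hc.1, hc.2, hs.1, hs.2, hh]
        have h2 : (s == ',' || s == '+') = false := by
          simp [hs.1, hs.2]
        rw [pvScan]
        · simp [h1, h2, pvLitOk, hne]
        · exact hne1
        · exact hne2

-- congruence of List.all under a member-wise equal predicate
theorem pv_all_congr_mem {L : List (List Char)} {f g : List Char → Bool}
    (h : ∀ a ∈ L, f a = g a) : L.all f = L.all g := by
  induction L with
  | nil => rfl
  | cons a t ih =>
    simp only [List.all_cons, h a List.mem_cons_self,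
      ih (fun x hx => h x (List.mem_cons_of_mem a hx))]

-- ===== VERDICT (by name: the statement is the Claim_ definition above) =====
theorem analyze_clausal_set_spec : Claim_equal_analyze_clausal_set := by
  intro c_set _
  unfold Spec_analyze_clausal_set analyze_clausal_set analyze_clausal_set_alt
  simp only [pv_replace_single, pv_splitOn_single]
  generalize hF : ((c_set.toList.filter (· != ' ')).filter (· != ')')).filter (· != '(') = F
  have hclause : ∀ cl ∈ pvSplitC ',' F, analyze_clause cl = (pvSplitC '+' cl).all pvLitOk := by
    intro cl hcl
    have hmem : ∀ a ∈ cl, a ≠ ' ' ∧ a ≠ ')' ∧ a ≠ '(' := by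
      intro a ha
      have := pv_mem_of_mem_splitC hcl ha
      rw [← hF] at this
      simp only [List.mem_filter, bne_iff_ne, ne_eq] at this
      exact ⟨this.1.1.2, this.1.2, this.2⟩
    have h1 : cl.filter (· != ' ') = cl :=
      List.filter_eq_self.mpr (fun a ha => by simp [(hmem a ha).1])
    have h2 : cl.filter (· != ')') = cl :=
      List.filter_eq_self.mpr (fun a ha => by simp [(hmem a ha).2.1])
    have h3 : cl.filter (· != '(') = cl :=
      List.filter_eq_self.mpr (fun a ha => by simp [(hmem a ha).2.2])
    unfold analyze_clause
    simp only [pv_replace_single]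
    rw [h1, h2, h3, pv_splitOn_single]
  rw [pv_all_congr_mem hclause, show (fun cl => (pvSplitC '+' cl).all pvLitOk)
      = (fun x => x.all pvLitOk) ∘ pvSplitC '+' from rfl, ← List.all_map, ← List.all_flatten,
    ← pvSplitB_eq_flatten, pv_main]
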